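-- pv_equiv track=rewrite | github.com/MrBrantCode/unitest_baseline | mut_generate/mist_train_cf/cf_62853/solution.py | count_pairs_of_nodes
-- ===== SOURCE A (Python) =====
-- from bisect import bisect_right
--
-- def count_pairs_of_nodes(n, edges, queries):
--     d = [0] * (n + 1)
--     for u, v in edges:
--         d[u] += 1
--         d[v] += 1
--     ds = sorted(d[1:])
--     prefix_sum = [0] * (n + 1)
--     for i in range(n):
--         prefix_sum[i + 1] = prefix_sum[i] + ds[i]
--     max_degrees = [max(d[u], d[v]) for u, v in edges]
--     max_degrees.sort()
--     res = []
--     for q in queries: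
--         pos = bisect_right(ds, q)
--         pos2 = bisect_right(max_degrees, q)
--         ans = (n - pos) * n - pos * (pos - 1) // 2 + sum(max_degrees) - sum(max_degrees[:pos2])
--         res.append(ans)
--     return res
-- ===== SOURCE B (Python) =====
-- from bisect import bisect_right
--
-- def count_pairs_of_nodes(n, edges, queries):
--     d = [0] * (n + 1)
--     for u, v in edges:
--         d[u] += 1
--         d[v] += 1
--     ds = sorted(d[1:])
--     max_degrees = sorted(max(d[u], d[v]) for u, v in edges)
--     # prefix sums of the sorted max_degrees, computed once:
--     # pref[k] == sum(max_degrees[:k]); replaces A's per-query O(E) slice-sums.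
--     pref = [0]
--     s = 0
--     for x in max_degrees:
--         s += x
--         pref.append(s)
--     total = s
--     return [(n - (pos := bisect_right(ds, q))) * n - pos * (pos - 1) // 2
--             + total - pref[bisect_right(max_degrees, q)]
--             for q in queries]
-- ===== Notes on version B (the rewrite author's own statement) =====
-- stated objective: faster
-- what changed: A re-sums all of max_degrees and a fresh slice max_degrees[:pos2] inside every query; B precomputes the prefix sums of the sorted max_degrees once and answers each query with two bisects and one prefix-sum lookup, so the per-query O(E) scan disappears.
-- outside the precondition, e.g. on count_pairs_of_nodes(1, [(2, 0)], [0]): A raises IndexError, B raises IndexError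
import Mathlib
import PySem

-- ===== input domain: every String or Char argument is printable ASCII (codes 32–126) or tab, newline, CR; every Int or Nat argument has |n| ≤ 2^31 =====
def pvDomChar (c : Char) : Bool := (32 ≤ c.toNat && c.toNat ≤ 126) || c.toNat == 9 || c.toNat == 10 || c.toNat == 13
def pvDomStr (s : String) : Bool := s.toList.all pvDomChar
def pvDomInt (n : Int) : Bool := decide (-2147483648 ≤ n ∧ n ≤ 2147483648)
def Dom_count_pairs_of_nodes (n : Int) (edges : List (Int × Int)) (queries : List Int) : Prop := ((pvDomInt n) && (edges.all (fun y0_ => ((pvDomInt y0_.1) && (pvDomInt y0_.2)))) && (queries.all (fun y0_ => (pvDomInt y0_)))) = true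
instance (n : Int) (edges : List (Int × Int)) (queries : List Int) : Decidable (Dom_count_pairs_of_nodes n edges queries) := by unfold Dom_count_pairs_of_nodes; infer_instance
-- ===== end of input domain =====

-- B precomputes the prefix sums of the sorted max_degrees once and answers each
-- query with bisects and one lookup instead of A's per-query O(E) slice-sums (objective: faster).


-- d[i] += 1 at Python index i (negative = from the end); exact via PySem under Pre_'s InRange
def pvIncr (xs : List Int) (i : Int) : List Int :=
  PySem.List.pySetD xs i (PySem.List.pyGetD xs i 0 + 1)

-- ===== PORT A =====
def count_pairs_of_nodes (n : Int) (edges : List (Int × Int)) (queries : List Int) : List Int :=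
  let d := edges.foldl (fun d e => pvIncr (pvIncr d e.1) e.2) (List.replicate (n + 1).toNat (0 : Int))
  let ds := PySem.List.sorted (PySem.List.slice d (some 1) none) (fun x => x) false
  let _prefix_sum := (PySem.List.pyRange 0 n 1).foldl
      (fun ps i => PySem.List.pySetD ps (i + 1) (PySem.List.pyGetD ps i 0 + PySem.List.pyGetD ds i 0))
      (List.replicate (n + 1).toNat (0 : Int))
  let max_degrees := PySem.List.sorted
      (edges.map (fun e => max (PySem.List.pyGetD d e.1 0) (PySem.List.pyGetD d e.2 0)))
      (fun x => x) false
  queries.foldl (fun res q =>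
    let pos : Int := (PySem.List.bisectRight ds q : Int)
    let pos2 : Int := (PySem.List.bisectRight max_degrees q : Int)
    res ++ [(n - pos) * n - PySem.Int.floordiv (pos * (pos - 1)) 2
            + max_degrees.sum - (PySem.List.slice max_degrees none (some pos2)).sum]) []

-- ===== PORT B =====
def count_pairs_of_nodes_alt (n : Int) (edges : List (Int × Int)) (queries : List Int) : List Int :=
  let d := edges.foldl (fun d e => pvIncr (pvIncr d e.1) e.2) (List.replicate (n + 1).toNat (0 : Int))
  let ds := PySem.List.sorted (PySem.List.slice d (some 1) none) (fun x => x) false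
  let max_degrees := PySem.List.sorted
      (edges.map (fun e => max (PySem.List.pyGetD d e.1 0) (PySem.List.pyGetD d e.2 0)))
      (fun x => x) false
  let ps := max_degrees.foldl (fun (p : List Int × Int) x => (p.1 ++ [p.2 + x], p.2 + x)) ([0], 0)
  let pref := ps.1
  let total := ps.2
  queries.map (fun q =>
    let pos : Int := (PySem.List.bisectRight ds q : Int)
    (n - pos) * n - PySem.Int.floordiv (pos * (pos - 1)) 2
      + total - PySem.List.pyGetD pref ((PySem.List.bisectRight max_degrees q : Nat) : Int) 0)

-- ===== PRECONDITION & SPEC =====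
-- Pre_ excludes exactly the inputs where Python A raises IndexError: an edge endpoint
-- that is not a valid Python index into the degree list of length (n+1) (max(n+1,0) entries).
def Pre_count_pairs_of_nodes (n : Int) (edges : List (Int × Int)) (queries : List Int) : Prop :=
  ∀ e ∈ edges, PySem.Raise.InRange (n + 1).toNat e.1 ∧ PySem.Raise.InRange (n + 1).toNat e.2
instance (n : Int) (edges : List (Int × Int)) (queries : List Int) : Decidable (Pre_count_pairs_of_nodes n edges queries) := by unfold Pre_count_pairs_of_nodes; infer_instance

def pvWitness_count_pairs_of_nodes : Int × (List (Int × Int)) × List Int := (3, [(1, 2), (2, 3)], [0, 1, 2])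

def Spec_count_pairs_of_nodes (n : Int) (edges : List (Int × Int)) (queries : List Int) (out : List Int) : Prop := out = count_pairs_of_nodes_alt n edges queries
instance (n : Int) (edges : List (Int × Int)) (queries : List Int) (out : List Int) : Decidable (Spec_count_pairs_of_nodes n edges queries out) := by unfold Spec_count_pairs_of_nodes; infer_instance

-- ===== CLAIM (what is proved, stated in full; the proofs are below) =====
def Claim_equal_count_pairs_of_nodes : Prop := ∀ (n : Int) (edges : List (Int × Int)) (queries : List Int), Dom_count_pairs_of_nodes n edges queries → Pre_count_pairs_of_nodes n edges queries → Spec_count_pairs_of_nodes n edges queries (count_pairs_of_nodes n edges queries)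

-- ===== LEMMAS AND PROOFS =====

-- B's prefix-sum loop in closed form: first component collects the running sums,
-- second is the final total.
theorem pvPrefFold (m : List Int) (acc : List Int) (s : Int) :
    m.foldl (fun (p : List Int × Int) x => (p.1 ++ [p.2 + x], p.2 + x)) (acc, s)
      = (acc ++ (List.range m.length).map (fun i => s + (m.take (i + 1)).sum), s + m.sum) := by
  induction m generalizing acc s with
  | nil => simp
  | cons x xs ih =>
    simp only [List.foldl_cons, ih, List.length_cons, List.sum_cons]
    rw [Prod.mk.injEq]
    refine ⟨?_, by ring⟩
    have h1 : (fun i => s + (List.take (i + 1) (x :: xs)).sum)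
            = (fun i => s + x + (List.take i xs).sum) := by
      funext i; simp only [List.take_succ_cons, List.sum_cons]; ring
    rw [h1, List.range_succ_eq_map, List.map_cons, List.map_map]
    simp [Function.comp_def]


-- pref[k] = sum of the first k elements, for k ≤ |m|.
theorem pvPrefAt (m : List Int) (k : Nat) (hk : k ≤ m.length) :
    ([(0 : Int)] ++ (List.range m.length).map (fun i => (0 : Int) + (m.take (i + 1)).sum)).getD k 0
      = (m.take k).sum := by
  cases k with
  | zero => simp
  | succ k =>
    have hk' : k < m.length := by omega
    simp [List.getD, List.getElem?_map, List.getElem?_range hk']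

-- ===== VERDICT (by name: the statement is the Claim_ definition above) =====
theorem count_pairs_of_nodes_spec : Claim_equal_count_pairs_of_nodes := by
  intro n edges queries _ _
  unfold Spec_count_pairs_of_nodes count_pairs_of_nodes count_pairs_of_nodes_alt
  simp only [PySem.List.foldl_append_singleton_eq_map, List.nil_append]
  apply List.map_congr_left
  intro q _
  set m := PySem.List.sorted
      (edges.map (fun e => max
        (PySem.List.pyGetD (edges.foldl (fun d e => pvIncr (pvIncr d e.1) e.2)
          (List.replicate (n + 1).toNat (0 : Int))) e.1 0)
        (PySem.List.pyGetD (edges.foldl (fun d e => pvIncr (pvIncr d e.1) e.2)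
          (List.replicate (n + 1).toNat (0 : Int))) e.2 0)))
      (fun x => x) false with hm
  have hpair : m.Pairwise (fun a b => a ≤ b) := PySem.List.sorted_pairwise _ _
  have hle : PySem.List.bisectRight m q ≤ m.length :=
    (PySem.List.bisectRight_spec m q hpair).1
  rw [PySem.List.slice_to_natCast, PySem.List.pyGetD_natCast, pvPrefFold]
  simp only []
  rw [pvPrefAt m _ hle]
  ring
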